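-- pv_equiv track=rewrite | github.com/JaimeAdanCuevas/security | cosigning/Ibst_sps5.0_1.0.846/IbstTool/tool/components/BitRegisterComponent.py | _get_bit_scopes
-- ===== SOURCE A (Python) =====
-- def _get_bit_scopes(missing_bits: []):
--     if not len(missing_bits):
--         return []
--     index = 0
--     bit_low = missing_bits[index]
--     bit_scopes = []
--     while index + 1 < len(missing_bits):
--         if missing_bits[index + 1] > missing_bits[index] + 1:
--             bit_high = missing_bits[index]
--             bit_scopes.append([bit_low, bit_high])
--             bit_low = missing_bits[index + 1]
--         index += 1
--     bit_high = missing_bits[-1]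
--     bit_scopes.append([bit_low, bit_high])
--     return bit_scopes
-- ===== SOURCE B (Python) =====
-- def _get_bit_scopes(missing_bits: []):
--     # Boundary-table decomposition: collect the gap pairs once, then zip
--     # segment starts (first element + each right side of a gap) with
--     # segment ends (each left side of a gap + last element).
--     if not missing_bits:
--         return []
--     gaps = [(a, b) for a, b in zip(missing_bits, missing_bits[1:]) if b > a + 1]
--     starts = [missing_bits[0]] + [b for _, b in gaps]
--     ends = [a for a, _ in gaps] + [missing_bits[-1]]
--     return [[s, e] for s, e in zip(starts, ends)]
-- ===== Notes on version B (the rewrite author's own statement) =====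
-- stated objective: alternative
-- what changed: Replaces A's single stateful index loop (carrying bit_low across iterations) by a three-phase boundary table: one pass collects the gap pairs from zipped consecutive elements, then segment starts and ends are built as lists and zipped into the result.
import Mathlib
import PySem

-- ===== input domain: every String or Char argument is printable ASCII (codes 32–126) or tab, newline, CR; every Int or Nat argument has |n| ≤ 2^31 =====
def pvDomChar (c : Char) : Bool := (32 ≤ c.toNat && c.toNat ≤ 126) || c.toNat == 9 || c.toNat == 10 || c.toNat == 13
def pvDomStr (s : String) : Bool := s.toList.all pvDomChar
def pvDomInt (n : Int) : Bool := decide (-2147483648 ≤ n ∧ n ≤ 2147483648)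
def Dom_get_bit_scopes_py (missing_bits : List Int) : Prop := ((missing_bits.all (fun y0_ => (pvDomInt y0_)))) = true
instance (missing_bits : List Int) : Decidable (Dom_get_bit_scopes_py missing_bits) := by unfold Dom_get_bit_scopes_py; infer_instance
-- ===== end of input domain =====

-- B replaces A's stateful index loop by a gap-pair table zipped into starts/ends (alternative decomposition, same cost).

-- ===== PORT A =====
-- the while loop of A; all indexed accesses are in range (index + 1 < length), so getD is exact
def pvALoop (xs : List Int) (index : Nat) (bit_low : Int) (bit_scopes : List (List Int)) :
    Int × List (List Int) :=
  if _h : index + 1 < xs.length then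
    if xs.getD (index + 1) 0 > xs.getD index 0 + 1 then
      pvALoop xs (index + 1) (xs.getD (index + 1) 0) (bit_scopes ++ [[bit_low, xs.getD index 0]])
    else
      pvALoop xs (index + 1) bit_low bit_scopes
  else (bit_low, bit_scopes)
termination_by xs.length - index

def get_bit_scopes_py (missing_bits : List Int) : List (List Int) :=
  if missing_bits.length = 0 then []
  else
    let r := pvALoop missing_bits 0 (missing_bits.getD 0 0) []
    -- missing_bits[-1]: the list is nonempty here, so getD (length-1) is exact
    r.2 ++ [[r.1, missing_bits.getD (missing_bits.length - 1) 0]]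

-- ===== PORT B =====
def get_bit_scopes_py_alt (missing_bits : List Int) : List (List Int) :=
  if missing_bits = [] then []
  else
    let gaps := (missing_bits.zip (missing_bits.drop 1)).filter (fun p => p.2 > p.1 + 1)
    let starts := missing_bits.headD 0 :: gaps.map (fun p => p.2)
    let ends := gaps.map (fun p => p.1) ++ [missing_bits.getLastD 0]
    (starts.zip ends).map (fun p => [p.1, p.2])

-- ===== PRECONDITION & SPEC =====
def Spec_get_bit_scopes_py (missing_bits : List Int) (out : List (List Int)) : Prop := out = get_bit_scopes_py_alt missing_bits
instance (missing_bits : List Int) (out : List (List Int)) : Decidable (Spec_get_bit_scopes_py missing_bits out) := by unfold Spec_get_bit_scopes_py; infer_instance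

-- ===== CLAIM (what is proved, stated in full; the proofs are below) =====
def Claim_equal_get_bit_scopes_py : Prop := ∀ (missing_bits : List Int), Dom_get_bit_scopes_py missing_bits → Spec_get_bit_scopes_py missing_bits (get_bit_scopes_py missing_bits)

-- ===== LEMMAS AND PROOFS =====

-- canonical structural recursion both ports are reduced to
def pvGo (low : Int) : List Int → List (List Int)
  | [] => []
  | [x] => [[low, x]]
  | x :: y :: rest =>
      if y > x + 1 then [low, x] :: pvGo y (y :: rest) else pvGo low (y :: rest)

theorem pvALoop_acc (n : Nat) : ∀ (xs : List Int) (i : Nat) (low : Int) (acc : List (List Int)),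
    xs.length ≤ i + n →
    pvALoop xs i low acc = ((pvALoop xs i low []).1, acc ++ (pvALoop xs i low []).2) := by
  induction n with
  | zero =>
    intro xs i low acc h
    have h1 : ¬ (i + 1 < xs.length) := by omega
    simp [pvALoop, h1]
  | succ n ih =>
    intro xs i low acc h
    rw [pvALoop]; conv_rhs => rw [pvALoop]
    by_cases h1 : i + 1 < xs.length
    · rw [dif_pos h1, dif_pos h1]
      by_cases h2 : xs.getD (i + 1) 0 > xs.getD i 0 + 1
      · rw [if_pos h2, if_pos h2]
        rw [ih xs (i+1) _ ([] ++ [[low, xs.getD i 0]]) (by omega),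
            ih xs (i+1) _ (acc ++ [[low, xs.getD i 0]]) (by omega)]
        simp
      · rw [if_neg h2, if_neg h2]
        exact ih xs (i+1) low acc (by omega)
    · rw [dif_neg h1, dif_neg h1]; simp

theorem pvALoop_go (n : Nat) : ∀ (xs : List Int) (i : Nat) (low : Int),
    i < xs.length → xs.length ≤ i + n →
    (pvALoop xs i low []).2 ++ [[(pvALoop xs i low []).1, xs.getD (xs.length - 1) 0]]
      = pvGo low (xs.drop i) := by
  induction n with
  | zero => intro xs i low h hn; omega
  | succ n ih =>
    intro xs i low h hn
    rw [pvALoop]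
    by_cases h1 : i + 1 < xs.length
    · rw [dif_pos h1]
      have hd : xs.drop i = xs[i] :: xs.drop (i + 1) := List.drop_eq_getElem_cons h
      have hd2 : xs.drop (i + 1) = xs[i+1] :: xs.drop (i + 2) := List.drop_eq_getElem_cons h1
      have hgi : xs.getD i 0 = xs[i] := List.getD_eq_getElem xs 0 h
      have hgi1 : xs.getD (i + 1) 0 = xs[i+1] := List.getD_eq_getElem xs 0 h1
      by_cases h2 : xs.getD (i + 1) 0 > xs.getD i 0 + 1
      · rw [if_pos h2]
        rw [pvALoop_acc xs.length xs (i+1) _ _ (by omega)]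
        have hIH := ih xs (i+1) xs[i+1] h1 (by omega)
        simp only [List.nil_append]
        rw [hd, hd2, pvGo, if_pos (by rw [hgi, hgi1] at h2; exact h2)]
        simp only [← hd2]
        rw [← hIH, hgi, hgi1]
        simp
      · rw [if_neg h2]
        have hIH := ih xs (i+1) low h1 (by omega)
        rw [hd, hd2, pvGo, if_neg (by rw [hgi, hgi1] at h2; exact h2)]
        rw [← hd2]
        exact hIH
    · rw [dif_neg h1]
      have hi : i = xs.length - 1 := by omega
      have hd : xs.drop i = xs[i] :: xs.drop (i + 1) := List.drop_eq_getElem_cons h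
      have hd2 : xs.drop (i + 1) = [] := List.drop_eq_nil_of_le (by omega)
      rw [hd, hd2, pvGo]
      have hgi : xs.getD (xs.length - 1) 0 = xs[i] := by
        rw [← hi]; exact List.getD_eq_getElem xs 0 h
      rw [hgi]
      simp

theorem pvAlt_go (low : Int) (xs : List Int) (h : xs ≠ []) :
    ((low :: ((xs.zip (xs.drop 1)).filter (fun p => p.2 > p.1 + 1)).map (fun p => p.2)).zip
      (((xs.zip (xs.drop 1)).filter (fun p => p.2 > p.1 + 1)).map (fun p => p.1) ++ [xs.getLastD 0])).map
      (fun p => [p.1, p.2]) = pvGo low xs := by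
  induction xs generalizing low with
  | nil => exact absurd rfl h
  | cons x t ih =>
    cases t with
    | nil => simp [pvGo]
    | cons y r =>
      have hih := fun (l : Int) => ih l (List.cons_ne_nil y r)
      have hlast : (x :: y :: r).getLastD 0 = (y :: r).getLastD 0 := by
        simp [List.getLastD_eq_getLast?, List.getLast?_cons_cons]
      by_cases hg : y > x + 1
      · simp only [List.drop_one, List.tail_cons, List.zip_cons_cons, List.filter_cons,
          decide_eq_true_eq, hg, if_pos, List.map_cons, hlast, List.cons_append] at hih ⊢
        rw [pvGo, if_pos hg, ← hih y]
      · simp only [List.drop_one, List.tail_cons, List.zip_cons_cons, List.filter_cons,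
          decide_eq_true_eq, hg, hlast] at hih ⊢
        rw [pvGo, if_neg hg, ← hih low]
        simp

-- ===== VERDICT (by name: the statement is the Claim_ definition above) =====
theorem get_bit_scopes_py_spec : Claim_equal_get_bit_scopes_py := by
  intro xs _
  unfold Spec_get_bit_scopes_py
  cases xs with
  | nil => rfl
  | cons x t =>
    unfold get_bit_scopes_py get_bit_scopes_py_alt
    rw [if_neg (by simp : ¬ (x :: t).length = 0), if_neg (List.cons_ne_nil x t)]
    show (pvALoop (x :: t) 0 ((x :: t).getD 0 0) []).2 ++
        [[(pvALoop (x :: t) 0 ((x :: t).getD 0 0) []).1, (x :: t).getD ((x :: t).length - 1) 0]] = _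
    have hA := pvALoop_go (x :: t).length (x :: t) 0 ((x :: t).getD 0 0) (by simp) (by omega)
    rw [List.drop_zero] at hA
    rw [hA, List.getD_cons_zero, ← pvAlt_go x (x :: t) (List.cons_ne_nil x t)]
    simp
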